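-- pv_equiv track=rewrite | github.com/pypi-data/pypi-mirror-366 | packages/cortex-memory-sdk/cortex_memory_sdk-2.0.0-py3-none-any.whl/cortex_memory/self_evolving_context.py | _analyze_topic_clusters
-- ===== SOURCE A (Python) =====
-- from typing import List, Dict, Tuple, Optional, Any
--
-- def _analyze_topic_clusters(queries: List[str]) -> Dict:
--     """
--     Analyze topic clusters in queries.
--
--     Args:
--         queries: List of query strings
--
--     Returns:
--         Dict with topic cluster analysis
--     """
--     clusters = {
--         'primary_topics': {},
--         'topic_combinations': {},
--         'topic_evolution': {},
--         'cross_topic_patterns': {}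
--     }
--
--     # Define topic keywords
--     topics = {
--         'security': ['security', 'auth', 'authentication', 'authorization', 'oauth', 'jwt', 'encryption'],
--         'performance': ['performance', 'optimization', 'speed', 'fast', 'slow', 'caching', 'database'],
--         'architecture': ['architecture', 'design', 'pattern', 'microservices', 'monolith', 'api'],
--         'deployment': ['deployment', 'docker', 'kubernetes', 'ci/cd', 'production', 'staging'],
--         'monitoring': ['monitoring', 'logging', 'metrics', 'alerting', 'observability'],
--         'testing': ['testing', 'test', 'unit', 'integration', 'qa', 'quality'],
--         'data': ['data', 'database', 'storage', 'cache', 'redis', 'postgresql']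
--     }
--
--     for query in queries:
--         query_lower = query.lower()
--         found_topics = []
--
--         for topic, keywords in topics.items():
--             if any(keyword in query_lower for keyword in keywords):
--                 found_topics.append(topic)
--                 clusters['primary_topics'][topic] = clusters['primary_topics'].get(topic, 0) + 1
--
--         # Topic combinations
--         if len(found_topics) > 1:
--             combination = '+'.join(sorted(found_topics))
--             clusters['topic_combinations'][combination] = clusters['topic_combinations'].get(combination, 0) + 1
--
--     return clusters
-- ===== SOURCE B (Python) =====
-- def _analyze_topic_clusters(queries):
--     topics = {
--         'security': ['security', 'auth', 'authentication', 'authorization', 'oauth', 'jwt', 'encryption'],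
--         'performance': ['performance', 'optimization', 'speed', 'fast', 'slow', 'caching', 'database'],
--         'architecture': ['architecture', 'design', 'pattern', 'microservices', 'monolith', 'api'],
--         'deployment': ['deployment', 'docker', 'kubernetes', 'ci/cd', 'production', 'staging'],
--         'monitoring': ['monitoring', 'logging', 'metrics', 'alerting', 'observability'],
--         'testing': ['testing', 'test', 'unit', 'integration', 'qa', 'quality'],
--         'data': ['data', 'database', 'storage', 'cache', 'redis', 'postgresql']
--     }
--
--     # Pass 1: detection — map each query to the list of topics it matches.
--     per_query = []
--     for query in queries:
--         ql = query.lower()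
--         per_query.append([t for t, kws in topics.items()
--                           if any(k in ql for k in kws)])
--
--     # Pass 2: aggregation.
--     primary = {}
--     for t in [t for fts in per_query for t in fts]:
--         primary[t] = primary.get(t, 0) + 1
--     combos = {}
--     for fts in per_query:
--         if len(fts) > 1:
--             key = '+'.join(sorted(fts))
--             combos[key] = combos.get(key, 0) + 1
--
--     return {
--         'primary_topics': primary,
--         'topic_combinations': combos,
--         'topic_evolution': {},
--         'cross_topic_patterns': {}
--     }
-- ===== Notes on version B (the rewrite author's own statement) =====
-- stated objective: alternative
-- what changed: A fuses detection and counting in one loop with interleaved dict updates; B first builds a per-query list of matched topics, then aggregates primary-topic counts from the flattened list and combination counts in separate passes.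
import Mathlib
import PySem

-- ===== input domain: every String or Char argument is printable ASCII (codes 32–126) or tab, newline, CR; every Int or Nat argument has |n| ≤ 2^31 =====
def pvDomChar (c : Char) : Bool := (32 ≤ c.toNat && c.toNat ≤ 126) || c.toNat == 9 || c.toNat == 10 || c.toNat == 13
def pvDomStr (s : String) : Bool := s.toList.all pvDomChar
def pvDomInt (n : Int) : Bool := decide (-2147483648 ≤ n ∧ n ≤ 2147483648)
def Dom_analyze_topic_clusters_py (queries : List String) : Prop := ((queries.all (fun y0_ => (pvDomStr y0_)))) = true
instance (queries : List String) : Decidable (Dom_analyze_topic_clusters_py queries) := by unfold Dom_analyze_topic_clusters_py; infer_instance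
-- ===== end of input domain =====

-- B separates detection (per-query matched-topic lists) from aggregation (two counting passes);
-- A fuses both into one loop. Same cost; equivalence of the return value is proved below.

-- ===== PORT A =====
-- the literal 'topics' table (shared data, identical in both Pythons)
def pvTopics : List (String × List String) :=
  [ ("security", ["security", "auth", "authentication", "authorization", "oauth", "jwt", "encryption"]),
    ("performance", ["performance", "optimization", "speed", "fast", "slow", "caching", "database"]),
    ("architecture", ["architecture", "design", "pattern", "microservices", "monolith", "api"]),
    ("deployment", ["deployment", "docker", "kubernetes", "ci/cd", "production", "staging"]),
    ("monitoring", ["monitoring", "logging", "metrics", "alerting", "observability"]),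
    ("testing", ["testing", "test", "unit", "integration", "qa", "quality"]),
    ("data", ["data", "database", "storage", "cache", "redis", "postgresql"]) ]

def analyze_topic_clusters_py (queries : List String) : List (String × List (String × Int)) :=
  let st :=
    queries.foldl (fun (st : PySem.Dict String Int × PySem.Dict String Int) query =>
      let ql := PySem.Str.lower query
      let inner :=
        pvTopics.foldl (fun (acc : List String × PySem.Dict String Int) tk =>
          if tk.2.any (fun kw => PySem.Str.isIn kw ql) then
            (acc.1 ++ [tk.1], acc.2.insert tk.1 (acc.2.getD tk.1 0 + 1))
          else acc) ([], st.1)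
      let found := inner.1
      if found.length > 1 then
        let comb := PySem.Str.join "+" (PySem.List.sorted found (fun x => x) false)
        (inner.2, st.2.insert comb (st.2.getD comb 0 + 1))
      else (inner.2, st.2)) (PySem.Dict.empty, PySem.Dict.empty)
  [ ("primary_topics", st.1.items), ("topic_combinations", st.2.items),
    ("topic_evolution", []), ("cross_topic_patterns", []) ]

-- ===== PORT B =====
-- pass 1 helper: the topics a single query matches
def pvDetect (query : String) : List String :=
  let ql := PySem.Str.lower query
  (pvTopics.filter (fun tk => tk.2.any (fun kw => PySem.Str.isIn kw ql))).map (·.1)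

def analyze_topic_clusters_py_alt (queries : List String) : List (String × List (String × Int)) :=
  let perQuery := queries.map pvDetect
  let primary :=
    (perQuery.flatMap (fun fts => fts)).foldl
      (fun (d : PySem.Dict String Int) t => d.insert t (d.getD t 0 + 1)) PySem.Dict.empty
  let combos :=
    perQuery.foldl (fun (d : PySem.Dict String Int) fts =>
      if fts.length > 1 then
        let key := PySem.Str.join "+" (PySem.List.sorted fts (fun x => x) false)
        d.insert key (d.getD key 0 + 1)
      else d) PySem.Dict.empty
  [ ("primary_topics", primary.items), ("topic_combinations", combos.items),
    ("topic_evolution", []), ("cross_topic_patterns", []) ]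

-- ===== PRECONDITION & SPEC =====
def Spec_analyze_topic_clusters_py (queries : List String) (out : List (String × List (String × Int))) : Prop := out = analyze_topic_clusters_py_alt queries
instance (queries : List String) (out : List (String × List (String × Int))) : Decidable (Spec_analyze_topic_clusters_py queries out) := by unfold Spec_analyze_topic_clusters_py; infer_instance

-- ===== CLAIM (what is proved, stated in full; the proofs are below) =====
def Claim_equal_analyze_topic_clusters_py : Prop := ∀ (queries : List String), Dom_analyze_topic_clusters_py queries → Spec_analyze_topic_clusters_py queries (analyze_topic_clusters_py queries)

-- ===== LEMMAS AND PROOFS =====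

-- A's inner loop over the topics table = detection (filter+map) plus a counting fold, from any start
theorem pvInner_eq (ts : List (String × List String)) (ql : String)
    (found : List String) (p : PySem.Dict String Int) :
    ts.foldl (fun (acc : List String × PySem.Dict String Int) tk =>
        if tk.2.any (fun kw => PySem.Str.isIn kw ql) then
          (acc.1 ++ [tk.1], acc.2.insert tk.1 (acc.2.getD tk.1 0 + 1))
        else acc) (found, p)
      = (found ++ (ts.filter (fun tk => tk.2.any (fun kw => PySem.Str.isIn kw ql))).map (·.1),
         ((ts.filter (fun tk => tk.2.any (fun kw => PySem.Str.isIn kw ql))).map (·.1)).foldl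
           (fun (d : PySem.Dict String Int) t => d.insert t (d.getD t 0 + 1)) p) := by
  induction ts generalizing found p with
  | nil => simp
  | cons tk rest ih =>
    rw [List.foldl_cons, List.filter_cons]
    by_cases h : tk.2.any (fun kw => PySem.Str.isIn kw ql) = true
    · rw [if_pos h, if_pos h, ih, List.map_cons, List.foldl_cons]
      simp [List.append_assoc]
    · rw [if_neg h, if_neg h, ih]

-- A's outer loop, from any pair of dicts, equals B's two aggregation folds over the detected lists
set_option maxHeartbeats 1000000 in
theorem pvOuter_eq (qs : List String) (p c : PySem.Dict String Int) :
    qs.foldl (fun (st : PySem.Dict String Int × PySem.Dict String Int) query =>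
      let ql := PySem.Str.lower query
      let inner :=
        pvTopics.foldl (fun (acc : List String × PySem.Dict String Int) tk =>
          if tk.2.any (fun kw => PySem.Str.isIn kw ql) then
            (acc.1 ++ [tk.1], acc.2.insert tk.1 (acc.2.getD tk.1 0 + 1))
          else acc) ([], st.1)
      let found := inner.1
      if found.length > 1 then
        let comb := PySem.Str.join "+" (PySem.List.sorted found (fun x => x) false)
        (inner.2, st.2.insert comb (st.2.getD comb 0 + 1))
      else (inner.2, st.2)) (p, c)
    = (((qs.map pvDetect).flatMap (fun fts => fts)).foldl
         (fun (d : PySem.Dict String Int) t => d.insert t (d.getD t 0 + 1)) p,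
       (qs.map pvDetect).foldl (fun (d : PySem.Dict String Int) fts =>
         if fts.length > 1 then
           let key := PySem.Str.join "+" (PySem.List.sorted fts (fun x => x) false)
           d.insert key (d.getD key 0 + 1)
         else d) c) := by
  induction qs generalizing p c with
  | nil => simp
  | cons q rest ih =>
    simp only [List.foldl_cons, List.map_cons, List.flatMap_cons, List.foldl_append]
    rw [pvInner_eq]
    by_cases h : (pvDetect q).length > 1
    · simp only [pvDetect, List.nil_append] at *
      rw [if_pos h, if_pos h]
      exact ih _ _
    · simp only [pvDetect, List.nil_append] at *
      rw [if_neg h, if_neg h]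
      exact ih _ _

-- ===== VERDICT (by name: the statement is the Claim_ definition above) =====
set_option maxHeartbeats 1000000 in
theorem analyze_topic_clusters_py_spec : Claim_equal_analyze_topic_clusters_py := by
  intro queries _
  show analyze_topic_clusters_py queries = analyze_topic_clusters_py_alt queries
  unfold analyze_topic_clusters_py analyze_topic_clusters_py_alt
  rw [pvOuter_eq]
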